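-- pv_equiv track=rewrite | github.com/rafalp/Misago | misago/forms/fields.py | to_python_unique_ci
-- ===== SOURCE A (Python) =====
-- def to_python_unique_ci(value: list[str]) -> list[str]:
--     unique_values: set[str] = set()
--     clean_value: list[str] = []
--     for item in value:
--         item_ci = item.lower()
--         if item_ci not in unique_values:
--             clean_value.append(item)
--             unique_values.add(item_ci)
--     return clean_value
-- ===== SOURCE B (Python) =====
-- def to_python_unique_ci(value: list[str]) -> list[str]:
--     result: list[str] = []
--     remaining = [(x.lower(), x) for x in value]
--     while remaining:
--         head_ci, head = remaining[0]
--         result.append(head)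
--         remaining = [p for p in remaining[1:] if p[0] != head_ci]
--     return result
-- ===== Notes on version B (the rewrite author's own statement) =====
-- stated objective: alternative
-- what changed: Replaces the single pass with a seen-set and membership branch by a branch-free removal scheme: lowercase everything once into (lowered, original) pairs, then repeatedly take the first remaining pair and filter every later case-insensitive duplicate out of the remaining list, so no seen-set or membership test exists at all.
import Mathlib
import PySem

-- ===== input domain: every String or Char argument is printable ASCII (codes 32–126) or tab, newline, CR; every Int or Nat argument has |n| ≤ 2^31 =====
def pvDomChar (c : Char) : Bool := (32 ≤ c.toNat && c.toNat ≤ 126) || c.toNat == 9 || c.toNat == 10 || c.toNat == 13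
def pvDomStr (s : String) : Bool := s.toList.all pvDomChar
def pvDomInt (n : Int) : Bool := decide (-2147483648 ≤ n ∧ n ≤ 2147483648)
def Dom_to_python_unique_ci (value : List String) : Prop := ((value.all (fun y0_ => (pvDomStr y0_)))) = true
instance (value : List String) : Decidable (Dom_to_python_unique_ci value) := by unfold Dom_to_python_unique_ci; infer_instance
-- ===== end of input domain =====

-- B replaces A's seen-set + membership branch with a removal scheme: take the first
-- remaining item, filter out all later case-insensitive duplicates, repeat (objective: alternative).


-- ===== PORT A =====
def to_python_unique_ci (value : List String) : List String :=
  (value.foldl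
    (fun (st : PySem.Set String × List String) item =>
      let item_ci := PySem.Str.lower item
      if PySem.Set.contains st.1 item_ci then st
      else (PySem.Set.add st.1 item_ci, st.2 ++ [item]))
    (PySem.Set.empty, [])).2

-- ===== PORT B =====
-- while-loop of Source B over the precomputed (lowercased, original) pairs; each step
-- appends the first pair's original and filters its case-insensitive duplicates out.
-- the list-comprehension predicate 'p[0] != head_ci'
def pvKeep (head_ci : String) (p : String × String) : Bool := p.1 != head_ci

def pyUniqueCiLoop : List String → List (String × String) → List String
  | result, [] => result
  | result, hd :: rest =>
    pyUniqueCiLoop (result ++ [hd.2]) (rest.filter (pvKeep hd.1))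
termination_by _ remaining => remaining.length
decreasing_by
  simpa using Nat.lt_succ_of_le (List.length_filter_le (pvKeep hd.1) rest)

def to_python_unique_ci_alt (value : List String) : List String :=
  pyUniqueCiLoop [] (value.map (fun x => (PySem.Str.lower x, x)))

-- ===== PRECONDITION & SPEC =====
def Spec_to_python_unique_ci (value : List String) (out : List String) : Prop := out = to_python_unique_ci_alt value
instance (value : List String) (out : List String) : Decidable (Spec_to_python_unique_ci value out) := by unfold Spec_to_python_unique_ci; infer_instance

-- ===== CLAIM (what is proved, stated in full; the proofs are below) =====
def Claim_equal_to_python_unique_ci : Prop := ∀ (value : List String), Dom_to_python_unique_ci value → Spec_to_python_unique_ci value (to_python_unique_ci value)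

-- ===== LEMMAS AND PROOFS =====

-- Bridge: A's fold started at (s, acc) equals B's loop started at acc on the pair list
-- with the already-seen (lowercased) items filtered away.
theorem to_python_unique_ci_bridge (value : List String) :
    ∀ (s : PySem.Set String) (acc : List String),
      (value.foldl
        (fun (st : PySem.Set String × List String) item =>
          let item_ci := PySem.Str.lower item
          if PySem.Set.contains st.1 item_ci then st
          else (PySem.Set.add st.1 item_ci, st.2 ++ [item]))
        (s, acc)).2
      = pyUniqueCiLoop acc
          ((value.map (fun x => (PySem.Str.lower x, x))).filter
            (fun p => !PySem.Set.contains s p.1)) := by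
  induction value with
  | nil => intro s acc; simp [pyUniqueCiLoop]
  | cons item rest ih =>
    intro s acc
    simp only [List.foldl, List.map, List.filter]
    by_cases h : PySem.Set.contains s (PySem.Str.lower item) = true
    · simp only [h, if_true, Bool.not_true]
      exact ih s acc
    · have h' : PySem.Set.contains s (PySem.Str.lower item) = false := by simpa using h
      simp only [h', Bool.not_false]
      rw [pyUniqueCiLoop]
      rw [List.filter_filter, ih]
      congr 1
      apply List.filter_congr
      intro p _
      have hnot : PySem.Str.lower item ∉ s := by
        simpa [PySem.Set.contains] using h'
      by_cases hx : p.1 = PySem.Str.lower item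
      · simp [pvKeep, PySem.Set.contains, PySem.Set.add, hnot, hx, List.mem_append]
      · simp [pvKeep, PySem.Set.contains, PySem.Set.add, hnot, hx, List.mem_append]

-- ===== VERDICT (by name: the statement is the Claim_ definition above) =====
theorem to_python_unique_ci_spec : Claim_equal_to_python_unique_ci := by
  intro value _
  unfold Spec_to_python_unique_ci to_python_unique_ci to_python_unique_ci_alt
  rw [to_python_unique_ci_bridge value PySem.Set.empty []]
  congr 1
  exact List.filter_eq_self.mpr (fun x _ => by
    simp [PySem.Set.contains, PySem.Set.empty])
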